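-- pv_equiv track=rewrite | github.com/EnzyNien/pythonfreetasks | N47.py | gen_trigrams
-- ===== SOURCE A (Python) =====
-- def gen_trigrams(tokens):
--     t0, t1 = ['$'] * 2
--     for t2 in tokens:
--         yield t0, t1, t2
--         if t2 in '.!?':
--             yield t1, t2, '$'
--             yield t2, '$', '$'
--             t0, t1 = '$', '$'
--         else:
--             t0, t1 = t1, t2
-- ===== SOURCE B (Python) =====
-- def gen_trigrams(tokens):
--     buf = []
--     for t in tokens:
--         if t in '.!?':
--             padded = ['$', '$'] + buf + [t, '$', '$']
--             yield from zip(padded, padded[1:], padded[2:])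
--             buf = []
--         else:
--             buf.append(t)
--     if buf:
--         padded = ['$', '$'] + buf
--         yield from zip(padded, padded[1:], padded[2:])
-- ===== Notes on version B (the rewrite author's own statement) =====
-- stated objective: alternative
-- what changed: Replaces A's rolling two-token state machine (yielding trigram by trigram as it scans) by a per-sentence buffer: tokens are collected until a '.!?' terminator, then all trigrams of the '$'-padded sentence are emitted at once as sliding windows via zip, with a no-trailing-padding pass for an unterminated final sentence.
import Mathlib
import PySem

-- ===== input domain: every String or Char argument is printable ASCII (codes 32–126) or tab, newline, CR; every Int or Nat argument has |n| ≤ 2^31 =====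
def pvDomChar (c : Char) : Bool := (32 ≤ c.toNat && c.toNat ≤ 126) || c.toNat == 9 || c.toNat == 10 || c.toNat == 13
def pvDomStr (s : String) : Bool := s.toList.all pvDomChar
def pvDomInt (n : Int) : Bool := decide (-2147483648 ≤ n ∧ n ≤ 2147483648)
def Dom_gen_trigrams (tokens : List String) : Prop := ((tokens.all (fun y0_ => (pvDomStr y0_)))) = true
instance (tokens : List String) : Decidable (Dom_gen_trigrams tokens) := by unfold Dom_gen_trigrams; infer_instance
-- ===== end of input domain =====

-- B replaces A's rolling two-token state by a per-sentence buffer emitted as sliding windows of the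
-- '$'-padded sentence (alternative decomposition, same cost; both generators are compared as lists).

-- ===== PORT A =====
-- the for-loop with rolling state (t0, t1); 't2 in ".!?"' is Python substring containment = PySem.Str.isIn
def gen_trigramsLoop : List String → String → String → List (String × String × String)
  | [], _, _ => []
  | t2 :: ts, t0, t1 =>
      (t0, t1, t2) ::
        (if PySem.Str.isIn t2 ".!?" then
          (t1, t2, "$") :: (t2, "$", "$") :: gen_trigramsLoop ts "$" "$"
        else
          gen_trigramsLoop ts t1 t2)

def gen_trigrams (tokens : List String) : List (String × String × String) :=
  gen_trigramsLoop tokens "$" "$"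

-- ===== PORT B =====
-- zip(padded, padded[1:], padded[2:]) of Source B; slices via PySem.List.slice
def pvWin3 (padded : List String) : List (String × String × String) :=
  List.zipWith3 (fun a b c => (a, b, c)) padded
    (PySem.List.slice padded (some 1) none) (PySem.List.slice padded (some 2) none)

-- the for-loop of Source B carrying the sentence buffer, then the final 'if buf:' block
def gen_trigramsAltLoop : List String → List String → List (String × String × String)
  | [], buf => if buf = [] then [] else pvWin3 (["$", "$"] ++ buf)
  | t :: ts, buf =>
      if PySem.Str.isIn t ".!?" then
        pvWin3 (["$", "$"] ++ buf ++ [t, "$", "$"]) ++ gen_trigramsAltLoop ts []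
      else
        gen_trigramsAltLoop ts (buf ++ [t])

def gen_trigrams_alt (tokens : List String) : List (String × String × String) :=
  gen_trigramsAltLoop tokens []

-- ===== PRECONDITION & SPEC =====
def Spec_gen_trigrams (tokens : List String) (out : List (String × String × String)) : Prop := out = gen_trigrams_alt tokens
instance (tokens : List String) (out : List (String × String × String)) : Decidable (Spec_gen_trigrams tokens out) := by unfold Spec_gen_trigrams; infer_instance

-- ===== CLAIM (what is proved, stated in full; the proofs are below) =====
def Claim_equal_gen_trigrams : Prop := ∀ (tokens : List String), Dom_gen_trigrams tokens → Spec_gen_trigrams tokens (gen_trigrams tokens)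

-- ===== LEMMAS AND PROOFS =====

-- the last two elements of "$"::"$"::buf (A's rolling state after consuming buf without punctuation)
def pvLast2 : String → String → List String → String × String
  | a, b, [] => (a, b)
  | _, b, x :: xs => pvLast2 b x xs

theorem pvLast2_snoc (xs : List String) (a b y : String) :
    pvLast2 a b (xs ++ [y]) = ((pvLast2 a b xs).2, y) := by
  induction xs generalizing a b with
  | nil => rfl
  | cons x xs ih => simpa [pvLast2] using ih b x

theorem pvWin3_cons (a b c : String) (r : List String) :
    pvWin3 (a :: b :: c :: r) = (a, b, c) :: pvWin3 (b :: c :: r) := by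
  simp [pvWin3, PySem.List.slice, List.zipWith3]

theorem pvWin3_two (a b : String) : pvWin3 [a, b] = [] := by
  simp [pvWin3, PySem.List.slice, List.zipWith3]

theorem pvWin3_snoc (xs : List String) (a b y : String) :
    pvWin3 (a :: b :: (xs ++ [y])) =
      pvWin3 (a :: b :: xs) ++ [((pvLast2 a b xs).1, (pvLast2 a b xs).2, y)] := by
  induction xs generalizing a b with
  | nil =>
      simp [pvWin3, PySem.List.slice, List.zipWith3, pvLast2]
  | cons c r ih =>
      have h1 : pvWin3 (a :: b :: (c :: r ++ [y])) = (a, b, c) :: pvWin3 (b :: c :: (r ++ [y])) := by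
        simpa using pvWin3_cons a b c (r ++ [y])
      rw [h1, ih, pvWin3_cons]
      simp [pvLast2]

theorem pvLoop_eq (ts : List String) (buf : List String) :
    gen_trigramsAltLoop ts buf =
      pvWin3 ("$" :: "$" :: buf) ++
        gen_trigramsLoop ts (pvLast2 "$" "$" buf).1 (pvLast2 "$" "$" buf).2 := by
  induction ts generalizing buf with
  | nil =>
      cases buf with
      | nil => simp [gen_trigramsAltLoop, gen_trigramsLoop, pvWin3_two]
      | cons x xs => simp [gen_trigramsAltLoop, gen_trigramsLoop]
  | cons t ts ih =>
      by_cases h : PySem.Str.isIn t ".!?"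
      · have hb : (["$", "$"] ++ buf ++ [t, "$", "$"] : List String)
            = "$" :: "$" :: (((buf ++ [t]) ++ ["$"]) ++ ["$"]) := by simp
        have hwin : pvWin3 (["$", "$"] ++ buf ++ [t, "$", "$"])
            = pvWin3 ("$" :: "$" :: buf) ++
                [((pvLast2 "$" "$" buf).1, (pvLast2 "$" "$" buf).2, t),
                 ((pvLast2 "$" "$" buf).2, t, "$"), (t, "$", "$")] := by
          rw [hb, pvWin3_snoc, pvWin3_snoc, pvWin3_snoc]
          simp only [pvLast2_snoc]
          simp
        simp only [gen_trigramsAltLoop, gen_trigramsLoop, h, if_pos, ih [], hwin]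
        simp [pvLast2, pvWin3_two]
      · simp only [gen_trigramsAltLoop, gen_trigramsLoop, h, ih (buf ++ [t])]
        simp only [Bool.false_eq_true, if_false]
        rw [pvWin3_snoc]
        simp [pvLast2_snoc]

-- ===== VERDICT (by name: the statement is the Claim_ definition above) =====
theorem gen_trigrams_spec : Claim_equal_gen_trigrams := by
  intro tokens _
  show gen_trigrams tokens = gen_trigrams_alt tokens
  rw [gen_trigrams, gen_trigrams_alt, pvLoop_eq tokens []]
  simp [pvLast2, pvWin3_two]
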